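-- pv_equiv track=rewrite | github.com/nttmkhang/String_Buoi | LC3A_Python/LC3A_Python.py | KiemTra
-- ===== SOURCE A (Python) =====
-- def KiemTra(a, b):
--     m = len(a)
--     n = len(b)
--
--     dem = 0
--     j = 0
--     for k in range(n):
--         if j < m and b[k] == a[j]:
--             j += 1
--         else:
--             dem += 1
--     if j == m:
--         return dem
--     return -1
-- ===== SOURCE B (Python) =====
-- def KiemTra(a, b):
--     # Index b once: for each character, the sorted list of its positions.
--     pos = {}
--     for i, c in enumerate(b):
--         pos.setdefault(c, []).append(i)
--     # For each character of a, binary-search its first position >= cur.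
--     cur = 0
--     for c in a:
--         lst = pos.get(c)
--         if lst is None:
--             return -1
--         lo, hi = 0, len(lst)
--         while lo < hi:
--             mid = (lo + hi) // 2
--             if lst[mid] < cur:
--                 lo = mid + 1
--             else:
--                 hi = mid
--         if lo == len(lst):
--             return -1
--         cur = lst[lo] + 1
--     return len(b) - len(a)
-- ===== Notes on version B (the rewrite author's own statement) =====
-- stated objective: alternative
-- what changed: B replaces A's single greedy scan with running mismatch counter by a two-stage algorithm: it first builds a per-character position index of b, then matches each character of a by binary search for its first position >= cur, returning len(b)-len(a) in closed form on success.
import Mathlib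
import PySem

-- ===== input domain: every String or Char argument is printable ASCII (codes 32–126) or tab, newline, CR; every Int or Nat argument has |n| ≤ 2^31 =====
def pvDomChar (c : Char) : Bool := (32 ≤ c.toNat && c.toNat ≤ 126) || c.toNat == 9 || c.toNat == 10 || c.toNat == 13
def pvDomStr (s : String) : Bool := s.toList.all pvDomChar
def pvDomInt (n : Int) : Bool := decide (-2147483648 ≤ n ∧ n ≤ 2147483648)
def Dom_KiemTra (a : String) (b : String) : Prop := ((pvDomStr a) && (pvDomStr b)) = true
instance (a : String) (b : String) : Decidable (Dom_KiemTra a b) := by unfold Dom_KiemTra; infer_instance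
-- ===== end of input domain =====

-- B replaces A's greedy counter scan by a two-stage algorithm (per-character position
-- index of b + binary search per character of a, closed-form count). Objective: alternative.

-- ===== PORT A =====
-- greedy scan over b with state (dem, j), exactly A's loop
def KiemTra (a : String) (b : String) : Int :=
  let m := a.toList.length
  let st : Int × Nat := b.toList.foldl
    (fun (s : Int × Nat) c =>
      if s.2 < m ∧ PySem.List.pyGet? a.toList (s.2 : Int) = some c then (s.1, s.2 + 1)
      else (s.1 + 1, s.2)) (0, 0)
  if st.2 = m then st.1 else -1

-- ===== PORT B =====
-- Source B's index-building loop: for i, c in enumerate(b): pos.setdefault(c, []).append(i)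
def pvIndex (b : List Char) : PySem.Dict Char (List Int) :=
  (PySem.List.enumerate b 0).foldl
    (fun d (p : Int × Char) => d.modify p.2 [] (fun l => l ++ [p.1])) PySem.Dict.empty

-- Source B's hand-written binary search: first index in [lo, hi) whose entry is >= cur
def pvBS (lst : List Int) (cur : Int) (lo hi : Nat) : Nat :=
  if lo < hi then
    if lst.getD ((lo + hi) / 2) 0 < cur then pvBS lst cur ((lo + hi) / 2 + 1) hi
    else pvBS lst cur lo ((lo + hi) / 2)
  else lo
termination_by hi - lo
decreasing_by all_goals omega

-- Source B's main loop over a: look up c's position list, binary-search first position >= cur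
def pvLoop (pos : PySem.Dict Char (List Int)) : List Char → Int → Bool
  | [], _ => true
  | c :: cs, cur =>
    match pos.get? c with
    | none => false
    | some lst =>
      let lo := pvBS lst cur 0 lst.length
      if lo = lst.length then false
      else pvLoop pos cs (lst.getD lo 0 + 1)

def KiemTra_alt (a : String) (b : String) : Int :=
  if pvLoop (pvIndex b.toList) a.toList 0 then
    (b.toList.length : Int) - (a.toList.length : Int)
  else -1

-- ===== PRECONDITION & SPEC =====
def Spec_KiemTra (a : String) (b : String) (out : Int) : Prop := out = KiemTra_alt a b
instance (a : String) (b : String) (out : Int) : Decidable (Spec_KiemTra a b out) := by unfold Spec_KiemTra; infer_instance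

-- ===== CLAIM (what is proved, stated in full; the proofs are below) =====
def Claim_equal_KiemTra : Prop := ∀ (a : String) (b : String), Dom_KiemTra a b → Spec_KiemTra a b (KiemTra a b)

-- ===== LEMMAS AND PROOFS =====

-- proof-side reference function: greedy consumption of b by a ("a is a subsequence of b")
def pvConsume : List Char → List Char → Bool
  | [], _ => true
  | _ :: _, [] => false
  | c :: cs, d :: ds => if d = c then pvConsume cs ds else pvConsume (c :: cs) ds

-- the position list Source B's index stores under key c
def pvOcc (c : Char) (b : List Char) : List Int :=
  (((PySem.List.enumerate b 0).map Prod.swap).filter (fun p => p.1 == c)).map (·.2)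

-- A-side loop invariant: running A's fold over bs with state (dem, j), j ≤ a.length,
-- the final j reaches a.length iff the unmatched suffix a.drop j is consumed by bs,
-- and in that case the final counter is exactly dem + bs.length - (a.length - j).
theorem pvKiemTra_loop (a : List Char) (bs : List Char) : ∀ (j : Nat) (dem : Int),
    j ≤ a.length →
    (let st := bs.foldl
       (fun (s : Int × Nat) c =>
         if s.2 < a.length ∧ PySem.List.pyGet? a (s.2 : Int) = some c then (s.1, s.2 + 1)
         else (s.1 + 1, s.2)) (dem, j)
     (st.2 = a.length ↔ pvConsume (a.drop j) bs = true) ∧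
     (pvConsume (a.drop j) bs = true →
       st.1 = dem + (bs.length : Int) - ((a.length - j : Nat) : Int))) := by
  induction bs with
  | nil =>
    intro j dem hj
    simp only [List.foldl_nil]
    by_cases hje : j = a.length
    · subst hje
      simp [pvConsume, List.drop_of_length_le (le_refl a.length)]
    · have hlt : j < a.length := lt_of_le_of_ne hj hje
      rw [List.drop_eq_getElem_cons hlt]
      simp [pvConsume, hje]
  | cons d ds ih =>
    intro j dem hj
    by_cases hlt : j < a.length
    · have hget : PySem.List.pyGet? a (j : Int) = some a[j] :=
        PySem.List.pyGet?_ofNat a j hlt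
      rw [List.drop_eq_getElem_cons hlt]
      by_cases hd : d = a[j]
      · have hcond : (j < a.length ∧ PySem.List.pyGet? a (j : Int) = some d) :=
          ⟨hlt, by rw [hget, hd]⟩
        rw [List.foldl_cons, if_pos hcond]
        have h2 := ih (j + 1) dem hlt
        simp only [pvConsume, if_pos hd]
        refine ⟨h2.1, fun h => ?_⟩
        have := h2.2 h
        simp only [List.length_cons] at this ⊢
        omega
      · have hcond : ¬ (j < a.length ∧ PySem.List.pyGet? a (j : Int) = some d) := by
          intro hx
          rw [hget] at hx
          exact hd (Option.some.inj hx.2).symm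
        rw [List.foldl_cons, if_neg hcond]
        have h2 := ih j (dem + 1) hj
        rw [List.drop_eq_getElem_cons hlt] at h2
        simp only [pvConsume, if_neg hd]
        refine ⟨h2.1, fun h => ?_⟩
        have := h2.2 h
        simp only [List.length_cons] at this ⊢
        omega
    · have hje : j = a.length := le_antisymm hj (le_of_not_gt hlt)
      have hcond : ¬ (j < a.length ∧ PySem.List.pyGet? a (j : Int) = some d) := by
        intro hx; exact hlt hx.1
      rw [List.foldl_cons, if_neg hcond]
      have h2 := ih j (dem + 1) hj
      rw [List.drop_of_length_le (le_of_eq hje.symm)] at h2 ⊢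
      simp only [pvConsume] at h2 ⊢
      refine ⟨h2.1, fun h => ?_⟩
      have := h2.2 h
      simp only [List.length_cons] at this ⊢
      omega

-- the index dict stores under c exactly pvOcc c b (or no entry when c ∉ b)
theorem pvOcc_eq (c : Char) (b : List Char) :
    pvOcc c b = ((PySem.List.enumerate b 0).filter (fun p => p.2 == c)).map (·.1) := by
  unfold pvOcc
  rw [List.filter_map, List.map_map]
  rfl

theorem pvIndex_getD (b : List Char) (c : Char) :
    (pvIndex b).getD c [] = pvOcc c b := by
  have key : (PySem.List.enumerate b 0).foldl
      (fun d (p : Int × Char) => d.modify p.2 [] (fun l => l ++ [p.1])) PySem.Dict.empty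
      = ((PySem.List.enumerate b 0).map Prod.swap).foldl
      (fun d (q : Char × Int) => d.modify q.1 [] (fun l => l ++ [q.2])) PySem.Dict.empty := by
    rw [List.foldl_map]; rfl
  unfold pvIndex pvOcc
  rw [key, PySem.Dict.getD_foldl_modify_append]
  simp [PySem.Dict.getD_empty]

theorem pvIndex_get?_none (b : List Char) (c : Char) :
    (pvIndex b).get? c = none ↔ c ∉ b := by
  rw [PySem.Dict.get?_eq_none_iff_not_mem_keys]
  unfold pvIndex
  rw [PySem.Dict.keys_foldl_modify_key]
  simp [PySem.Set.mem_update, PySem.List.map_snd_enumerate, PySem.Dict.keys_empty]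

-- membership in the position list
theorem pvOcc_mem (c : Char) (b : List Char) (x : Int) :
    x ∈ pvOcc c b ↔ ∃ (k : Nat) (hk : k < b.length), x = (k : Int) ∧ b[k] = c := by
  rw [pvOcc_eq]
  simp only [List.mem_map, List.mem_filter, PySem.List.mem_enumerate_iff]
  constructor
  · rintro ⟨p, ⟨⟨k, hk, hq⟩, hp⟩, rfl⟩
    subst hq
    refine ⟨k, hk, by simp, by simpa using hp⟩
  · rintro ⟨k, hk, rfl, hbk⟩
    exact ⟨((k : Int), b[k]), ⟨⟨k, hk, by simp⟩, by simp [hbk]⟩, rfl⟩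

-- the position list is strictly increasing
theorem pvOcc_pairwise (c : Char) (b : List Char) :
    (pvOcc c b).Pairwise (· < ·) := by
  rw [pvOcc_eq]
  apply List.Pairwise.map
  · exact fun p q h => h
  · apply List.Pairwise.filter
    exact (PySem.List.pairwise_lt_enumerate b 0).imp (fun h => h)

-- entries of a (·≤·)-sorted list are monotone in the index
theorem pvGetD_mono (lst : List Int) (hs : lst.Pairwise (· ≤ ·)) (i j : Nat)
    (hij : i ≤ j) (hj : j < lst.length) : lst.getD i 0 ≤ lst.getD j 0 := by
  rcases eq_or_lt_of_le hij with rfl | hlt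
  · exact le_refl _
  · rw [List.getD_eq_getElem _ _ (lt_trans hlt hj), List.getD_eq_getElem _ _ hj]
    exact List.pairwise_iff_getElem.mp hs i j _ _ hlt

-- binary-search invariant: result r keeps "all entries below r are < cur, all from r on are ≥ cur"
theorem pvBS_spec (lst : List Int) (cur : Int) (hs : lst.Pairwise (· ≤ ·)) :
    ∀ (fuel lo hi : Nat), hi - lo ≤ fuel → lo ≤ hi → hi ≤ lst.length →
    (∀ i, i < lo → lst.getD i 0 < cur) →
    (∀ i, hi ≤ i → i < lst.length → cur ≤ lst.getD i 0) →
    pvBS lst cur lo hi ≤ lst.length ∧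
    (∀ i, i < pvBS lst cur lo hi → lst.getD i 0 < cur) ∧
    (∀ i, pvBS lst cur lo hi ≤ i → i < lst.length → cur ≤ lst.getD i 0) := by
  have mono := pvGetD_mono lst hs
  intro fuel
  induction fuel with
  | zero =>
    intro lo hi hf hlh hhi hlow hhigh
    have : lo = hi := by omega
    subst this
    rw [pvBS, if_neg (lt_irrefl lo)]
    exact ⟨le_trans hlh hhi, hlow, hhigh⟩
  | succ f ih =>
    intro lo hi hf hlh hhi hlow hhigh
    by_cases h : lo < hi
    · rw [pvBS, if_pos h]
      split_ifs with hm
      · -- lst[mid] < cur : recurse on [mid+1, hi)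
        apply ih ((lo + hi) / 2 + 1) hi (by omega) (by omega) hhi
        · intro i hilt
          by_cases hio : i < lo
          · exact hlow i hio
          · exact lt_of_le_of_lt (mono i ((lo + hi) / 2) (by omega) (by omega)) hm
        · exact hhigh
      · -- cur ≤ lst[mid] : recurse on [lo, mid)
        apply ih lo ((lo + hi) / 2) (by omega) (by omega) (by omega) hlow
        intro i hmid hilen
        calc cur ≤ lst.getD ((lo + hi) / 2) 0 := le_of_not_gt hm
          _ ≤ lst.getD i 0 := mono _ _ hmid hilen
    · have : lo = hi := by omega
      subst this
      rw [pvBS, if_neg h]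
      exact ⟨le_trans hlh hhi, hlow, hhigh⟩

-- greedy consumption steps to just past the first occurrence of c
theorem pvConsume_firstOcc (c : Char) (cs : List Char) : ∀ (bs : List Char) (j : Nat)
    (hj : j < bs.length), bs[j] = c → (∀ p (hp : p < j), bs[p] ≠ c) →
    pvConsume (c :: cs) bs = pvConsume cs (bs.drop (j + 1)) := by
  intro bs
  induction bs with
  | nil => intro j hj; simp at hj
  | cons d ds ih =>
    intro j hj hget hbefore
    cases j with
    | zero =>
      simp only [List.getElem_cons_zero] at hget
      simp [pvConsume, hget]
    | succ t =>
      have hd : d ≠ c := by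
        have := hbefore 0 (Nat.succ_pos t)
        simpa using this
      simp only [pvConsume, if_neg hd]
      have := ih t (by simpa using hj) (by simpa using hget)
        (fun p hp => by simpa using hbefore (p + 1) (by omega))
      simpa using this

theorem pvConsume_not_mem (c : Char) (cs : List Char) : ∀ (bs : List Char), c ∉ bs →
    pvConsume (c :: cs) bs = false := by
  intro bs
  induction bs with
  | nil => intro _; rfl
  | cons d ds ih =>
    intro h
    have hd : d ≠ c := fun hdc => h (by simp [hdc])
    simp only [pvConsume, if_neg hd]
    exact ih (fun hc => h (List.mem_cons_of_mem d hc))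

-- B's main loop computes greedy consumption of the rest of b
theorem pvLoop_eq_consume (b : List Char) : ∀ (cs : List Char) (cur : Int), 0 ≤ cur →
    pvLoop (pvIndex b) cs cur = pvConsume cs (b.drop cur.toNat) := by
  intro cs
  induction cs with
  | nil => intro cur _; simp [pvLoop, pvConsume]
  | cons c cs ih =>
    intro cur hcur
    rw [pvLoop]
    cases hg : (pvIndex b).get? c with
    | none =>
      have hnb : c ∉ b := (pvIndex_get?_none b c).mp hg
      rw [pvConsume_not_mem c cs _ (fun h => hnb (List.mem_of_mem_drop h))]
    | some lst =>
      have hlst : lst = pvOcc c b := by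
        have h0 := pvIndex_getD b c
        rw [PySem.Dict.getD_eq_get?_getD, hg] at h0
        simpa using h0
      have hle : lst.Pairwise (· ≤ ·) := (hlst ▸ pvOcc_pairwise c b).imp le_of_lt
      have hspec := pvBS_spec lst cur hle lst.length 0 lst.length (by omega) (Nat.zero_le _)
        le_rfl (by omega) (fun i h1 h2 => absurd h2 (by omega))
      -- any index of b holding c appears in lst
      have hidx : ∀ (p : Nat) (hp : p < b.length), b[p] = c → ((p : Nat) : Int) ∈ lst := by
        intro p hp hbp
        rw [hlst, pvOcc_mem]
        exact ⟨p, hp, rfl, hbp⟩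
      show (if pvBS lst cur 0 lst.length = lst.length then false
          else pvLoop (pvIndex b) cs (lst.getD (pvBS lst cur 0 lst.length) 0 + 1))
        = pvConsume (c :: cs) (List.drop cur.toNat b)
      by_cases hrl : pvBS lst cur 0 lst.length = lst.length
      · -- every stored position is < cur : c does not occur in b.drop cur.toNat
        have hnot : c ∉ b.drop cur.toNat := by
          intro hmem
          obtain ⟨j, hj, hbj⟩ := List.mem_iff_getElem.mp hmem
          rw [List.getElem_drop] at hbj
          have hjb : cur.toNat + j < b.length := by
            have := hj; rw [List.length_drop] at this; omega
          obtain ⟨idx, hidxlt, hlidx⟩ := List.mem_iff_getElem.mp (hidx _ hjb hbj)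
          have hlt := hspec.2.1 idx (by omega)
          rw [List.getD_eq_getElem _ _ hidxlt, hlidx] at hlt
          have : ((cur.toNat : Int)) = cur := Int.toNat_of_nonneg hcur
          push_cast at hlt
          omega
        rw [if_pos hrl, pvConsume_not_mem c cs _ hnot]
      · rw [if_neg hrl]
        have hrlen : pvBS lst cur 0 lst.length < lst.length := lt_of_le_of_ne hspec.1 hrl
        have hee : lst.getD (pvBS lst cur 0 lst.length) 0 = lst[pvBS lst cur 0 lst.length] :=
          List.getD_eq_getElem _ _ hrlen
        have hem : lst.getD (pvBS lst cur 0 lst.length) 0 ∈ lst := hee ▸ List.getElem_mem _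
        obtain ⟨k, hk, hek, hbk⟩ := (pvOcc_mem c b _).mp (by rw [← hlst]; exact hem)
        have hcurle : cur ≤ lst.getD (pvBS lst cur 0 lst.length) 0 := hspec.2.2 _ le_rfl hrlen
        have hck : ((cur.toNat : Nat) : Int) = cur := Int.toNat_of_nonneg hcur
        have hkcur : cur.toNat ≤ k := by omega
        -- first occurrence of c in b.drop cur.toNat sits at index k - cur.toNat
        have hstep := pvConsume_firstOcc c cs (b.drop cur.toNat) (k - cur.toNat)
          (by rw [List.length_drop]; omega)
          (by rw [List.getElem_drop]; have : cur.toNat + (k - cur.toNat) = k := by omega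
              simp only [this]; exact hbk)
          (by
            intro p hp hbp
            rw [List.getElem_drop] at hbp
            have hpb : cur.toNat + p < b.length := by omega
            obtain ⟨idx, hidxlt, hlidx⟩ := List.mem_iff_getElem.mp (hidx _ hpb hbp)
            by_cases hi : idx < pvBS lst cur 0 lst.length
            · have hlt := hspec.2.1 idx hi
              rw [List.getD_eq_getElem _ _ hidxlt, hlidx] at hlt
              push_cast at hlt
              omega
            · have hmono := pvGetD_mono lst hle (pvBS lst cur 0 lst.length) idx (by omega) hidxlt
              rw [hee, List.getD_eq_getElem _ _ hidxlt, hlidx, ← hee, hek] at hmono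
              push_cast at hmono
              omega)
        rw [hstep, List.drop_drop]
        have harg : (lst.getD (pvBS lst cur 0 lst.length) 0 + 1).toNat
            = cur.toNat + (k - cur.toNat + 1) := by
          rw [hek]; omega
        have := ih (lst.getD (pvBS lst cur 0 lst.length) 0 + 1) (by rw [hek]; positivity)
        rw [this, harg]

-- ===== VERDICT (by name: the statement is the Claim_ definition above) =====
theorem KiemTra_spec : Claim_equal_KiemTra := by
  intro a b _
  simp only [Spec_KiemTra, KiemTra, KiemTra_alt]
  have h := pvKiemTra_loop a.toList b.toList 0 0 (Nat.zero_le _)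
  simp only [List.drop_zero, Nat.sub_zero] at h
  have hB : pvLoop (pvIndex b.toList) a.toList 0 = pvConsume a.toList b.toList := by
    have := pvLoop_eq_consume b.toList a.toList 0 le_rfl
    simpa using this
  rw [hB]
  by_cases hc : pvConsume a.toList b.toList = true
  · rw [if_pos hc]
    split_ifs with he
    · have := h.2 hc; omega
    · exact absurd (h.1.2 hc) he
  · rw [if_neg hc]
    split_ifs with he
    · exact absurd (h.1.1 he) hc
    · rfl
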